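-- pv_equiv track=rewrite | github.com/pewapplepie/Qunat_Interview_Algo | squarepointprep/papersheet.py | minMoves2
-- ===== SOURCE A (Python) =====
-- def minMoves2(h, w, h1, w1):
-- # Write your code here
--     def minFold(start, target):
--         count = 0
--         while start > target:
--             count += 1
--             start = start // 2 + int(start % 2 != 0)
--         return count
--     return minFold(h, h1) + minFold(w, w1)
-- ===== SOURCE B (Python) =====
-- def minMoves2(h, w, h1, w1):
--     def minFold(start, target):
--         # closed form: answer is the least k with target * 2**k >= start,
--         # i.e. the bit length of ceil(start/target) - 1 (no loop).
--         if start <= target: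
--             return 0
--         q = -(-start // target)          # ceil(start / target)
--         return (q - 1).bit_length()
--     return minFold(h, h1) + minFold(w, w1)
-- ===== Notes on version B (the rewrite author's own statement) =====
-- stated objective: alternative
-- what changed: A repeatedly ceil-halves start counting iterations; B computes the count in closed form as the bit length of ceil(start/target)-1 (the least k with target*2^k >= start), no loop over the value at all.
import Mathlib
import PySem

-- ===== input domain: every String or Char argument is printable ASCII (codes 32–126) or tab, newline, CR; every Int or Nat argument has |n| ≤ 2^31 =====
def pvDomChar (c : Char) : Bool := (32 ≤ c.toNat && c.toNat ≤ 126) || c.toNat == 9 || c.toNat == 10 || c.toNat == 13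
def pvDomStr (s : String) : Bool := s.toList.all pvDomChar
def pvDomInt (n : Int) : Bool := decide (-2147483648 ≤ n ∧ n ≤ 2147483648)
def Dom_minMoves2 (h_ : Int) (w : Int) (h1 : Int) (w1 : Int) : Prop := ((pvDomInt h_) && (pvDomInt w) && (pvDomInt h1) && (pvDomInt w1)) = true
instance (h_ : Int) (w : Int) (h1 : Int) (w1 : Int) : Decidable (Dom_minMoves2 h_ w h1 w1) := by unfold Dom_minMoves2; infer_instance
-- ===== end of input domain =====

-- B replaces A's ceil-halving loop by a loop-free closed form (bit length of ceil(start/target) - 1).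

-- ===== PORT A =====
-- A's `while start > target` loop, with fuel only to make it total in Lean;
-- fuel (start.toNat + 1) suffices on Pre_ (start strictly decreases each iteration).
def minFoldA : Nat → Int → Int → Int → Int
  | 0, _, _, count => count
  | fuel+1, start, target, count =>
    if start > target then
      minFoldA fuel (PySem.Int.floordiv start 2 + (if PySem.Int.mod start 2 ≠ 0 then 1 else 0)) target (count + 1)
    else count

def minMoves2 (h_ : Int) (w : Int) (h1 : Int) (w1 : Int) : Int :=
  minFoldA (h_.toNat + 1) h_ h1 0 + minFoldA (w.toNat + 1) w w1 0

-- ===== PORT B =====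
-- Python's n.bit_length(), exact for n ≥ 0 (the only way B calls it).
def pyBitLength (n : Int) : Int := if n = 0 then 0 else ((Nat.log2 n.toNat + 1 : Nat) : Int)

def minFoldAlt (start target : Int) : Int :=
  if start ≤ target then 0
  else pyBitLength (-(PySem.Int.floordiv (-start) target) - 1)

def minMoves2_alt (h_ : Int) (w : Int) (h1 : Int) (w1 : Int) : Int :=
  minFoldAlt h_ h1 + minFoldAlt w w1

-- ===== PRECONDITION & SPEC =====
-- Pre_ excludes exactly the inputs on which A's while-loop never terminates
-- (a pair with start > target and target ≤ 0: ceil-halving then never gets below the target).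
def Pre_minMoves2 (h_ : Int) (w : Int) (h1 : Int) (w1 : Int) : Prop :=
  (h_ ≤ h1 ∨ 1 ≤ h1) ∧ (w ≤ w1 ∨ 1 ≤ w1)
instance (h_ : Int) (w : Int) (h1 : Int) (w1 : Int) : Decidable (Pre_minMoves2 h_ w h1 w1) := by unfold Pre_minMoves2; infer_instance

def pvWitness_minMoves2 : Int × Int × Int × Int := (5, 17, 2, 3)

def Spec_minMoves2 (h_ : Int) (w : Int) (h1 : Int) (w1 : Int) (out : Int) : Prop := out = minMoves2_alt h_ w h1 w1
instance (h_ : Int) (w : Int) (h1 : Int) (w1 : Int) (out : Int) : Decidable (Spec_minMoves2 h_ w h1 w1 out) := by unfold Spec_minMoves2; infer_instance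

-- ===== CLAIM (what is proved, stated in full; the proofs are below) =====
def Claim_equal_minMoves2 : Prop := ∀ (h_ : Int) (w : Int) (h1 : Int) (w1 : Int), Dom_minMoves2 h_ w h1 w1 → Pre_minMoves2 h_ w h1 w1 → Spec_minMoves2 h_ w h1 w1 (minMoves2 h_ w h1 w1)

-- ===== LEMMAS AND PROOFS =====

-- A's loop-body update: ceiling division by 2.
def ceilhalf (a : Int) : Int :=
  PySem.Int.floordiv a 2 + (if PySem.Int.mod a 2 ≠ 0 then 1 else 0)

-- A's start value after i iterations.
def citer (s : Int) : Nat → Int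
  | 0 => s
  | i+1 => ceilhalf (citer s i)

lemma ceilhalf_gt_iff (a t : Int) : ceilhalf a > t ↔ a > 2 * t := by
  unfold ceilhalf
  rw [PySem.Int.floordiv_eq_ediv_of_pos (by omega), PySem.Int.mod_eq_emod_of_pos (by omega)]
  split_ifs with h <;> omega

lemma ceilhalf_le (a : Int) (h : 2 ≤ a) : ceilhalf a ≤ a - 1 := by
  unfold ceilhalf
  rw [PySem.Int.floordiv_eq_ediv_of_pos (by omega), PySem.Int.mod_eq_emod_of_pos (by omega)]
  split_ifs with h' <;> omega

lemma citer_gt_iff (s : Int) : ∀ (i : Nat) (t : Int), citer s i > t ↔ s > t * 2 ^ i := by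
  intro i
  induction i with
  | zero => intro t; simp [citer]
  | succ i ih =>
    intro t
    rw [show citer s (i+1) = ceilhalf (citer s i) from rfl, ceilhalf_gt_iff, ih (2 * t), pow_succ]
    constructor <;> intro h <;> nlinarith [h]

-- A's loop counts exactly up to the least K with s0 ≤ t * 2^K.
lemma A_char (t s0 : Int) (ht : 1 ≤ t) (K : Nat) (hK : s0 ≤ t * 2 ^ K)
    (hK' : ∀ j, j < K → t * 2 ^ j < s0) :
    ∀ (fa i : Nat) (c : Int), i ≤ K → citer s0 i - t ≤ (fa : Int) →
      minFoldA fa (citer s0 i) t c = c + ((K : Int) - (i : Int)) := by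
  intro fa
  induction fa with
  | zero =>
    intro i c hi hfa
    have hng : ¬ citer s0 i > t := by omega
    have hiK : i = K := by
      by_contra hne
      have hlt : i < K := lt_of_le_of_ne hi hne
      exact hng ((citer_gt_iff s0 i t).mpr (hK' i hlt))
    subst hiK
    simp [minFoldA]
  | succ fa ih =>
    intro i c hi hfa
    by_cases hg : citer s0 i > t
    · have hs : s0 > t * 2 ^ i := (citer_gt_iff s0 i t).mp hg
      have hiK : i < K := by
        by_contra hge
        have : i = K := le_antisymm hi (by omega)
        subst this; omega
      have hdec : citer s0 (i+1) ≤ citer s0 i - 1 := ceilhalf_le _ (by omega)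
      simp only [minFoldA, if_pos hg]
      have hc : (PySem.Int.floordiv (citer s0 i) 2 + if PySem.Int.mod (citer s0 i) 2 ≠ 0 then (1:Int) else 0) = citer s0 (i+1) := rfl
      rw [hc, ih (i+1) (c+1) hiK (by push_cast at hfa ⊢; omega)]
      push_cast; ring
    · have hiK : i = K := by
        by_contra hne
        exact hg ((citer_gt_iff s0 i t).mpr (hK' i (lt_of_le_of_ne hi hne)))
      subst hiK
      simp [minFoldA, hg]

lemma pair (s t : Int) (h : s ≤ t ∨ 1 ≤ t) :
    minFoldA (s.toNat + 1) s t 0 = minFoldAlt s t := by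
  by_cases hle : s ≤ t
  · simp [minFoldA, minFoldAlt, hle, not_lt.mpr hle]
  · have ht : 1 ≤ t := by rcases h with h' | h' <;> omega
    have hst : t < s := by omega
    -- q = ceil(s / t)
    set q : Int := -(PySem.Int.floordiv (-s) t) with hq
    have hfd : PySem.Int.floordiv (-s) t = (-s) / t := PySem.Int.floordiv_eq_ediv_of_pos (by omega)
    have hmod := Int.emod_nonneg (-s) (by omega : t ≠ 0)
    have hmlt := Int.emod_lt_of_pos (-s) (by omega : 0 < t)
    have hdm := Int.mul_ediv_add_emod (-s) t
    have hqs : t * q - t < s ∧ s ≤ t * q := by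
      constructor <;> [nlinarith [hdm, hmod, hmlt, hfd, hq]; nlinarith [hdm, hmod, hfd, hq]]
    have hq2 : 2 ≤ q := by nlinarith [hqs.1, hqs.2]
    set m : Nat := (q - 1).toNat with hm
    have hmq : (m : Int) = q - 1 := by omega
    have hm1 : 1 ≤ m := by omega
    set K : Nat := Nat.log2 m + 1 with hK
    -- the two bounds characterising K
    have hup : (m : Int) < 2 ^ K := by
      have : m < 2 ^ K := (Nat.log2_lt (by omega)).mp (by omega)
      exact_mod_cast this
    have hlow : (2 : Int) ^ (K - 1) ≤ (m : Int) := by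
      have : 2 ^ Nat.log2 m ≤ m := Nat.log2_self_le (by omega)
      have h2 : (2 : Int) ^ Nat.log2 m ≤ (m : Int) := by exact_mod_cast this
      simpa [hK] using h2
    have hKub : s ≤ t * 2 ^ K := by nlinarith [hqs.2, hup, hmq, ht]
    have hKlb : ∀ j, j < K → t * 2 ^ j < s := by
      intro j hj
      have hjle : (2 : Int) ^ j ≤ 2 ^ (K - 1) :=
        pow_le_pow_right₀ (by norm_num) (by omega)
      nlinarith [hqs.1, hlow, hmq, ht, hjle]
    have hA := A_char t s ht K hKub hKlb (s.toNat + 1) 0 0 (Nat.zero_le _)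
      (by simp [citer]; omega)
    simp only [citer] at hA
    rw [hA]
    unfold minFoldAlt pyBitLength
    rw [if_neg (by omega), hfd]
    have hqm : -((-s) / t) - 1 = (m : Int) := by omega
    rw [hqm]
    rw [if_neg (by exact_mod_cast (by omega : (m : Int) ≠ 0))]
    simp [Int.toNat_natCast, hK]

-- ===== VERDICT (by name: the statement is the Claim_ definition above) =====
theorem minMoves2_spec : Claim_equal_minMoves2 := by
  intro h_ w h1 w1 _hd hp
  unfold Spec_minMoves2 minMoves2 minMoves2_alt
  rw [pair h_ h1 hp.1, pair w w1 hp.2]
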